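-- pv_equiv track=rewrite | github.com/uditsharma29/llm_training_data_pipeline | scripts/extract_from_repo.py | stream_and_parse_definitions
-- ===== SOURCE A (Python) =====
-- def stream_and_parse_definitions(lines):
--     """
--     A generator that takes a list of lines and yields chunks of text
--     that are likely to be top-level class or function definitions.
--     """
--     chunk_buffer = []
--     for line in lines:
--         if (line.startswith('def ') or line.startswith('class ') or line.startswith('@')) and not line.startswith(' '):
--             if chunk_buffer:
--                 yield "".join(chunk_buffer)
--             chunk_buffer = [line]
--         elif chunk_buffer:
--             chunk_buffer.append(line)
--
--     if chunk_buffer: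
--         yield "".join(chunk_buffer)
-- ===== SOURCE B (Python) =====
-- def _is_header(line):
--     return (line.startswith('def ') or line.startswith('class ') or line.startswith('@')) and not line.startswith(' ')
--
--
-- def stream_and_parse_definitions(lines):
--     # Single reverse scan: walk the lines back-to-front, collecting the tail of
--     # the current chunk; each header closes a chunk.  Leading non-header lines
--     # are dropped automatically and no end-of-loop flush is needed.
--     chunks = []
--     pending = []
--     for line in reversed(lines):
--         if _is_header(line):
--             chunks.append("".join([line] + pending[::-1]))
--             pending = []
--         else:
--             pending.append(line)
--     yield from reversed(chunks)
-- ===== Notes on version B (the rewrite author's own statement) =====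
-- stated objective: alternative
-- what changed: Replaced the forward scan with a rolling buffer and an end-of-loop flush by a single reverse scan that closes a chunk at each header, making the trailing flush and the leading-junk drop implicit.
import Mathlib
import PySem

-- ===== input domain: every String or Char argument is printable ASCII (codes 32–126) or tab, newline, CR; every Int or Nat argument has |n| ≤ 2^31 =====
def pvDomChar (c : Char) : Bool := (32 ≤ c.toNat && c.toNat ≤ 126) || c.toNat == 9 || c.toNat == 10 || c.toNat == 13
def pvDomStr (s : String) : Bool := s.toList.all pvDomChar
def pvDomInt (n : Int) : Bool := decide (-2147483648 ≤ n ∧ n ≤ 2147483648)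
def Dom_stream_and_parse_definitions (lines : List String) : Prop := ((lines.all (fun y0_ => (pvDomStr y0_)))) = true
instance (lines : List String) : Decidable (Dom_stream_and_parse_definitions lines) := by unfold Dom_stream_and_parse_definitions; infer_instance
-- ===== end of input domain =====

-- B replaces A's forward scan with rolling buffer + final flush by a single reverse scan
-- that closes a chunk at each top-level header (alternative decomposition, same O(n) cost).


-- ===== PORT A =====
-- `(line.startswith('def ') or line.startswith('class ') or line.startswith('@')) and not line.startswith(' ')`
def pvHdrA (line : String) : Bool :=
  (PySem.Str.startswith line "def " || PySem.Str.startswith line "class " || PySem.Str.startswith line "@")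
    && !(PySem.Str.startswith line " ")

-- A's loop over `lines` carrying (chunk_buffer, yielded chunks), plus the final flush.
def pvGoA (buf out : List String) : List String → List String
  | [] => if buf ≠ [] then out ++ [PySem.Str.join "" buf] else out
  | l :: ls =>
    if pvHdrA l then
      pvGoA [l] (if buf ≠ [] then out ++ [PySem.Str.join "" buf] else out) ls
    else if buf ≠ [] then
      pvGoA (buf ++ [l]) out ls
    else
      pvGoA buf out ls

def stream_and_parse_definitions (lines : List String) : List String :=
  pvGoA [] [] lines

-- ===== PORT B =====
def pvHdrB (line : String) : Bool :=
  (PySem.Str.startswith line "def " || PySem.Str.startswith line "class " || PySem.Str.startswith line "@")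
    && !(PySem.Str.startswith line " ")

-- One step of B's reverse scan: state = (pending tail lines, chunks built so far).
def pvStepB (line : String) (st : List String × List String) : List String × List String :=
  if pvHdrB line then ([], PySem.Str.join "" (line :: st.1) :: st.2)
  else (line :: st.1, st.2)

-- `for line in reversed(lines)` with state (pending, chunks) = a right fold over lines.
def stream_and_parse_definitions_alt (lines : List String) : List String :=
  (lines.foldr pvStepB ([], [])).2

-- ===== PRECONDITION & SPEC =====
def Spec_stream_and_parse_definitions (lines : List String) (out : List String) : Prop := out = stream_and_parse_definitions_alt lines
instance (lines : List String) (out : List String) : Decidable (Spec_stream_and_parse_definitions lines out) := by unfold Spec_stream_and_parse_definitions; infer_instance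

-- ===== CLAIM (what is proved, stated in full; the proofs are below) =====
def Claim_equal_stream_and_parse_definitions : Prop := ∀ (lines : List String), Dom_stream_and_parse_definitions lines → Spec_stream_and_parse_definitions lines (stream_and_parse_definitions lines)

-- ===== LEMMAS AND PROOFS =====

theorem pvHdrB_eq (l : String) : pvHdrB l = pvHdrA l := rfl

-- A with a non-empty buffer: the buffer absorbs B's pending prefix of the first chunk.
theorem pvGoA_ne (ls : List String) : ∀ (buf out : List String), buf ≠ [] →
    pvGoA buf out ls
      = out ++ PySem.Str.join "" (buf ++ (ls.foldr pvStepB ([], [])).1) :: (ls.foldr pvStepB ([], [])).2 := by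
  induction ls with
  | nil => intro buf out h; simp [pvGoA, h]
  | cons l ls ih =>
    intro buf out h
    by_cases hl : pvHdrA l = true
    · simp only [pvGoA, hl, if_pos, h, ne_eq, not_false_eq_true, List.foldr_cons,
        pvStepB, pvHdrB_eq]
      rw [ih [l] _ (by simp)]
      simp
    · simp only [pvGoA, hl, if_neg, Bool.not_eq_true, h, ne_eq, not_false_eq_true, if_true,
        List.foldr_cons, pvStepB, pvHdrB_eq]
      rw [ih (buf ++ [l]) out (by simp)]
      simp

-- A with an empty buffer (the phase before the first header): output is B's chunk list.
theorem pvGoA_nil (ls : List String) : ∀ (out : List String),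
    pvGoA [] out ls = out ++ (ls.foldr pvStepB ([], [])).2 := by
  induction ls with
  | nil => intro out; simp [pvGoA]
  | cons l ls ih =>
    intro out
    by_cases hl : pvHdrA l = true
    · simp only [pvGoA, hl, if_pos, ne_eq, not_true_eq_false, if_false, List.foldr_cons,
        pvStepB, pvHdrB_eq]
      rw [pvGoA_ne ls [l] out (by simp)]
      simp
    · simp only [pvGoA, hl, if_false, List.foldr_cons, pvStepB, pvHdrB_eq,
        reduceIte, ne_eq, not_true_eq_false]
      rw [ih out]
      simp

-- ===== VERDICT (by name: the statement is the Claim_ definition above) =====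
theorem stream_and_parse_definitions_spec : Claim_equal_stream_and_parse_definitions := by
  intro lines _
  show pvGoA [] [] lines = stream_and_parse_definitions_alt lines
  rw [pvGoA_nil lines []]
  rfl
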